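-- pv_equiv track=rewrite | github.com/ribeirofrv/inventory-report | inventory_report/reports/simple_report.py | generate
-- ===== SOURCE A (Python) =====
-- def generate(stock):
--     oldest_date = min(
--         [item["data_de_fabricacao"] for item in stock]
--     )
--
--     closest_date = min([item["data_de_validade"] for item in stock])
--
--     products_by_company = {}
--     for item in stock:
--         company = item["nome_da_empresa"]
--         if company in products_by_company:
--             products_by_company[company] += 1
--         else:
--             products_by_company[company] = 1
--
--     company_bigger_stock = max(
--         products_by_company, key=products_by_company.get
--     )
--
--     return (
--         f"Data de fabricação mais antiga: {oldest_date}\n"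
--         f"Data de validade mais próxima: {closest_date}\n"
--         f"Empresa com mais produtos: {company_bigger_stock}"
--     )
-- ===== SOURCE B (Python) =====
-- def generate(stock):
--     it = iter(stock)
--     first = next(it)
--     oldest_date = first["data_de_fabricacao"]
--     closest_date = first["data_de_validade"]
--     products_by_company = {first["nome_da_empresa"]: 1}
--     for item in it:
--         fab = item["data_de_fabricacao"]
--         if fab < oldest_date:
--             oldest_date = fab
--         val = item["data_de_validade"]
--         if val < closest_date:
--             closest_date = val
--         company = item["nome_da_empresa"]
--         products_by_company[company] = products_by_company.get(company, 0) + 1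
--     company_bigger_stock = max(
--         products_by_company, key=products_by_company.get
--     )
--     return (
--         f"Data de fabricação mais antiga: {oldest_date}\n"
--         f"Data de validade mais próxima: {closest_date}\n"
--         f"Empresa com mais produtos: {company_bigger_stock}"
--     )
-- ===== Notes on version B (the rewrite author's own statement) =====
-- stated objective: alternative
-- what changed: Replaces A's three independent passes over stock (two list-comprehension mins plus a counting loop) by a single fused pass that seeds all three accumulators from the first item and updates the running minima and the company counter together.
import Mathlib
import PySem

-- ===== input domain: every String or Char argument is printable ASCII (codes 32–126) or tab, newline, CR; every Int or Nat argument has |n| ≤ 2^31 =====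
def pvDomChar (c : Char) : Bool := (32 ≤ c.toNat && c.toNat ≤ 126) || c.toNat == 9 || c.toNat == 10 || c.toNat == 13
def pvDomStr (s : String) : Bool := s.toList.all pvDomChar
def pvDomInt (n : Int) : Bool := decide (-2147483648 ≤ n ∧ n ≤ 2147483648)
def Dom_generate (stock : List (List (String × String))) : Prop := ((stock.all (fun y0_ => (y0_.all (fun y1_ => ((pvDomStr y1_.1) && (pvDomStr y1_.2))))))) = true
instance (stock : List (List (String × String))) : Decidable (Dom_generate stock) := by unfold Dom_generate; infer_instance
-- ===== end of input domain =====

-- B fuses A's three passes over stock into one loop; same return value (proof below).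

-- ===== PORT A =====
-- item["k"] (dict lookup, first match); total form — Pre_generate guarantees the key is present
def pvGet (item : List (String × String)) (k : String) : String :=
  (PySem.Dict.mk item).getD k ""

def generate (stock : List (List (String × String))) : String :=
  let oldest := (PySem.List.min? (stock.map (fun item => pvGet item "data_de_fabricacao")) (fun x => x)).getD ""
  let closest := (PySem.List.min? (stock.map (fun item => pvGet item "data_de_validade")) (fun x => x)).getD ""
  let pbc := stock.foldl (fun d item =>
      let c := pvGet item "nome_da_empresa"
      if d.contains c then d.modify c 0 (· + 1) else d.insert c (1 : Int)) PySem.Dict.empty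
  let company := (PySem.List.max? pbc.keys (fun k => pbc.getD k 0)).getD ""
  "Data de fabricação mais antiga: " ++ oldest ++
    "\nData de validade mais próxima: " ++ closest ++
    "\nEmpresa com mais produtos: " ++ company

-- ===== PORT B =====
-- one step of Source B's fused loop: update both running minima and the counter
def altStep (s : String × String × PySem.Dict String Int)
    (item : List (String × String)) : String × String × PySem.Dict String Int :=
  let fab := pvGet item "data_de_fabricacao"
  let val := pvGet item "data_de_validade"
  let c := pvGet item "nome_da_empresa"
  ((if fab < s.1 then fab else s.1),
   (if val < s.2.1 then val else s.2.1),
   s.2.2.insert c (s.2.2.getD c 0 + 1))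

def generate_alt (stock : List (List (String × String))) : String :=
  match stock with
  | [] => ""   -- Source B raises StopIteration here (outside Pre_generate)
  | first :: rest =>
    let init : String × String × PySem.Dict String Int :=
      (pvGet first "data_de_fabricacao", pvGet first "data_de_validade",
       (PySem.Dict.empty : PySem.Dict String Int).insert (pvGet first "nome_da_empresa") 1)
    let s := rest.foldl altStep init
    let company := (PySem.List.max? s.2.2.keys (fun k => s.2.2.getD k 0)).getD ""
    "Data de fabricação mais antiga: " ++ s.1 ++
      "\nData de validade mais próxima: " ++ s.2.1 ++
      "\nEmpresa com mais produtos: " ++ company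

-- ===== PRECONDITION & SPEC =====
-- Pre_ excludes exactly the inputs where the Python A raises: the empty list (min of an
-- empty sequence, ValueError) and items missing one of the three keys (KeyError).
def Pre_generate (stock : List (List (String × String))) : Prop :=
  stock ≠ [] ∧ ∀ item ∈ stock,
    (PySem.Dict.mk item).contains "data_de_fabricacao" = true ∧
    (PySem.Dict.mk item).contains "data_de_validade" = true ∧
    (PySem.Dict.mk item).contains "nome_da_empresa" = true
instance (stock : List (List (String × String))) : Decidable (Pre_generate stock) := by
  unfold Pre_generate; infer_instance

def pvWitness_generate : (List (List (String × String))) :=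
  [[("data_de_fabricacao", "2020-01-01"), ("data_de_validade", "2023-05-01"), ("nome_da_empresa", "Acme")]]

def Spec_generate (stock : List (List (String × String))) (out : String) : Prop := out = generate_alt stock
instance (stock : List (List (String × String))) (out : String) : Decidable (Spec_generate stock out) := by unfold Spec_generate; infer_instance

-- ===== CLAIM (what is proved, stated in full; the proofs are below) =====
def Claim_equal_generate : Prop := ∀ (stock : List (List (String × String))), Dom_generate stock → Pre_generate stock → Spec_generate stock (generate stock)

-- ===== LEMMAS AND PROOFS =====

-- B's fused fold splits into three independent folds
theorem altStep_split (rest : List (List (String × String)))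
    (o c : String) (d : PySem.Dict String Int) :
    rest.foldl altStep (o, c, d) =
      (rest.foldl (fun a item => if pvGet item "data_de_fabricacao" < a then pvGet item "data_de_fabricacao" else a) o,
       rest.foldl (fun a item => if pvGet item "data_de_validade" < a then pvGet item "data_de_validade" else a) c,
       rest.foldl (fun d item => d.insert (pvGet item "nome_da_empresa")
         (d.getD (pvGet item "nome_da_empresa") 0 + 1)) d) := by
  induction rest generalizing o c d with
  | nil => rfl
  | cons x t ih => simp only [List.foldl_cons, altStep, ih]

-- a running 'if g x < acc then g x else acc' loop is the fold of min over the projections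
theorem foldl_if_lt_eq_foldl_min {α : Type} (g : α → String) (l : List α) (a : String) :
    l.foldl (fun acc x => if g x < acc then g x else acc) a = (l.map g).foldl min a := by
  induction l generalizing a with
  | nil => rfl
  | cons x t ih =>
    simp only [List.foldl_cons, List.map_cons, ih]
    congr 1
    rcases lt_or_ge (g x) a with h | h
    · simp [h, min_def, le_of_lt h, (not_le.mpr h)]
    · simp [not_lt.mpr h, min_def, h]

-- A's counting-loop body equals B's insert/getD body on every dict and item
theorem count_step_eq (d : PySem.Dict String Int) (item : List (String × String)) :
    (let c := pvGet item "nome_da_empresa";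
     if d.contains c then d.modify c 0 (· + 1) else d.insert c (1 : Int)) =
    d.insert (pvGet item "nome_da_empresa") (d.getD (pvGet item "nome_da_empresa") 0 + 1) := by
  by_cases h : d.contains (pvGet item "nome_da_empresa")
  · simp [h, PySem.Dict.modify]
  · rw [if_neg h, PySem.Dict.getD_of_not_contains d _ (by simpa using h)]
    norm_num

theorem generate_eq_alt (first : List (String × String)) (rest : List (List (String × String))) :
    generate (first :: rest) = generate_alt (first :: rest) := by
  simp only [generate, generate_alt, List.map_cons, List.foldl_cons]
  rw [altStep_split]
  rw [foldl_if_lt_eq_foldl_min (fun item => pvGet item "data_de_fabricacao") rest,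
      foldl_if_lt_eq_foldl_min (fun item => pvGet item "data_de_validade") rest]
  rw [PySem.List.min?_id_cons, PySem.List.min?_id_cons]
  have hcnt : rest.foldl (fun d item =>
        let c := pvGet item "nome_da_empresa"
        if d.contains c then d.modify c 0 (· + 1) else d.insert c (1 : Int))
        ((PySem.Dict.empty : PySem.Dict String Int).insert (pvGet first "nome_da_empresa") 1)
      = rest.foldl (fun d item => d.insert (pvGet item "nome_da_empresa")
          (d.getD (pvGet item "nome_da_empresa") 0 + 1))
        ((PySem.Dict.empty : PySem.Dict String Int).insert (pvGet first "nome_da_empresa") 1) := by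
    have hb : (fun (d : PySem.Dict String Int) (item : List (String × String)) =>
        let c := pvGet item "nome_da_empresa"
        if d.contains c then d.modify c 0 (· + 1) else d.insert c (1 : Int)) =
        (fun d item => d.insert (pvGet item "nome_da_empresa")
          (d.getD (pvGet item "nome_da_empresa") 0 + 1)) := by
      funext d item; exact count_step_eq d item
    rw [hb]
  have hfirst : (if (PySem.Dict.empty : PySem.Dict String Int).contains (pvGet first "nome_da_empresa")
        then (PySem.Dict.empty : PySem.Dict String Int).modify (pvGet first "nome_da_empresa") 0 (· + 1)
        else (PySem.Dict.empty : PySem.Dict String Int).insert (pvGet first "nome_da_empresa") (1 : Int))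
      = (PySem.Dict.empty : PySem.Dict String Int).insert (pvGet first "nome_da_empresa") 1 := by
    simp [PySem.Dict.contains, PySem.Dict.empty]
  simp only [hfirst, hcnt, Option.getD_some]

-- ===== VERDICT (by name: the statement is the Claim_ definition above) =====
theorem generate_spec : Claim_equal_generate := by
  intro stock _ hpre
  unfold Spec_generate
  cases stock with
  | nil => exact absurd rfl hpre.1
  | cons first rest => exact generate_eq_alt first rest
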